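-- pv_equiv track=rewrite | github.com/leo-bro/TIL | python/programmers/conditional-array3.py | solution
-- ===== SOURCE A (Python) =====
-- def solution(arr):
--     answer = 0
--     xarr = []
--     xarr.append(arr.copy())
--     while True:
--         for i in range(len(arr)):
--             if arr[i] >= 50 and arr[i] % 2 == 0:
--                 arr[i] = arr[i] // 2
--             elif arr[i] < 50 and arr[i] % 2 == 1:
--                 arr[i] = arr[i] * 2 + 1
--         if arr in xarr:
--             answer = len(xarr) - 1
--             break
--         xarr.append(arr.copy())
--     return answer
-- ===== SOURCE B (Python) =====
-- def solution(arr):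
--     # Per-element: the transform acts independently on each position, and each
--     # good element reaches a fixed point without ever revisiting a value, so the
--     # answer is simply the maximum number of steps any single element needs.
--     # (A mutates arr in place; B does not - the equivalence is about the return value.)
--     best = 0
--     for x in arr:
--         t = 0
--         while True:
--             if x >= 50 and x % 2 == 0:
--                 y = x // 2
--             elif x < 50 and x % 2 == 1:
--                 y = x * 2 + 1
--             else:
--                 y = x
--             if y == x:
--                 break
--             x = y
--             t += 1
--         best = max(best, t)
--     return best
-- ===== Notes on version B (the rewrite author's own statement) =====
-- stated objective: simpler
-- what changed: B drops A's full state-history list and its membership scans: the transform acts on each element independently and never revisits a value before reaching its fixed point, so B counts for each element the steps to its fixed point and returns the maximum (A also mutates arr in place, B does not; the claim is about the return value).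
import Mathlib
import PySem

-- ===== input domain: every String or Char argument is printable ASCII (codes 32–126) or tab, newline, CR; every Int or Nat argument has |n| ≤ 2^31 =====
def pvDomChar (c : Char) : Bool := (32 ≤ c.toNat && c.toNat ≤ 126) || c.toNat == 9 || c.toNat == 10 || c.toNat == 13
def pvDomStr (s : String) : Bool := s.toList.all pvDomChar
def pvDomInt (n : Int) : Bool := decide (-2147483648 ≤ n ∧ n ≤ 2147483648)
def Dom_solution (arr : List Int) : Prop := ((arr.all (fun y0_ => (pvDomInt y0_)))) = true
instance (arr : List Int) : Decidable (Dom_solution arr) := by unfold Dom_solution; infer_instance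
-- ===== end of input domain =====

-- B replaces A's state-history loop (with its history membership scans) by a per-element
-- fixed-point step count and a running max; A mutates arr in place, B does not — the
-- equivalence proved here is about the RETURN value only.


-- ===== PORT A =====
-- body of A's inner for-loop (one index i); i ∈ range(len(arr)) is always in range, so pyGetD/pySetD are exact
def pvBodyA (a : List Int) (i : Int) : List Int :=
  let x := PySem.List.pyGetD a i 0
  if 50 ≤ x ∧ PySem.Int.mod x 2 = 0 then PySem.List.pySetD a i (PySem.Int.floordiv x 2)
  else if x < 50 ∧ PySem.Int.mod x 2 = 1 then PySem.List.pySetD a i (x * 2 + 1)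
  else a

-- A's inner for-loop: one in-place pass over range(len(arr))
def pvStepA (arr : List Int) : List Int :=
  (PySem.List.pyRange 0 arr.length 1).foldl pvBodyA arr

-- A's 'while True' loop; Lean needs a fuel bound: 2^33 iterations always suffice on Pre_ inputs in Dom (proved below)
def pvLoopA : Nat → List Int → List (List Int) → Int
  | 0, _, _ => 0
  | fuel+1, arr, xarr =>
    let arr' := pvStepA arr
    if arr' ∈ xarr then (xarr.length : Int) - 1
    else pvLoopA fuel arr' (xarr ++ [arr'])

def solution (arr : List Int) : Int := pvLoopA (2 ^ 33) arr [arr]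

-- ===== PORT B =====
-- B's elementwise transform (one step)
def pvStepB (x : Int) : Int :=
  if 50 ≤ x ∧ PySem.Int.mod x 2 = 0 then PySem.Int.floordiv x 2
  else if x < 50 ∧ PySem.Int.mod x 2 = 1 then x * 2 + 1
  else x

-- B's inner 'while True' counting loop; same fuel bound 2^33 (sufficient on Pre_ inputs in Dom, proved below)
def pvSteps : Nat → Int → Int → Int
  | 0, t, _ => t
  | fuel+1, t, x =>
    let y := pvStepB x
    if y = x then t else pvSteps fuel (t + 1) y

def solution_alt (arr : List Int) : Int :=
  arr.foldl (fun best x => max best (pvSteps (2 ^ 33) 0 x)) 0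

-- ===== PRECONDITION & SPEC =====
-- Pre_ excludes arrays containing an odd element smaller than -1: on those A's while loop never
-- terminates (that element strictly decreases forever, so no state ever repeats) and Python B's
-- while loop never terminates either; on every other input A returns.
def Pre_solution (arr : List Int) : Prop := ∀ x ∈ arr, PySem.Int.mod x 2 = 0 ∨ -1 ≤ x
instance (arr : List Int) : Decidable (Pre_solution arr) := by unfold Pre_solution; infer_instance
def pvWitness_solution : List Int := [1, 2, 51, 100]

def Spec_solution (arr : List Int) (out : Int) : Prop := out = solution_alt arr
instance (arr : List Int) (out : Int) : Decidable (Spec_solution arr out) := by unfold Spec_solution; infer_instance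

-- ===== CLAIM (what is proved, stated in full; the proofs are below) =====
def Claim_equal_solution : Prop := ∀ (arr : List Int), Dom_solution arr → Pre_solution arr → Spec_solution arr (solution arr)

-- ===== LEMMAS AND PROOFS =====

-- the three possible outcomes of one elementwise step, with PySem mod/floordiv turned into % and /
lemma step_cases (x : Int) :
    (50 ≤ x ∧ x % 2 = 0 ∧ pvStepB x = x / 2) ∨
    (x < 50 ∧ x % 2 = 1 ∧ pvStepB x = x * 2 + 1) ∨
    (¬(50 ≤ x ∧ x % 2 = 0) ∧ ¬(x < 50 ∧ x % 2 = 1) ∧ pvStepB x = x) := by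
  have h : pvStepB x = if 50 ≤ x ∧ x % 2 = 0 then x / 2 else if x < 50 ∧ x % 2 = 1 then x * 2 + 1 else x := by
    simp [pvStepB]
  rw [h]; split_ifs with h1 h2 <;> tauto

-- "good" = the element's trajectory terminates (Pre_ says every element is good)
def pvGood (x : Int) : Prop := x % 2 = 0 ∨ -1 ≤ x

lemma good_step {x : Int} (h : pvGood x) : pvGood (pvStepB x) := by
  unfold pvGood at *
  rcases step_cases x with ⟨h1,h2,hv⟩|⟨h1,h2,hv⟩|⟨h1,h2,hv⟩ <;> rw [hv] <;> omega

lemma good_iter {x : Int} (h : pvGood x) : ∀ j, pvGood (pvStepB^[j] x) := by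
  intro j
  induction j with
  | zero => simpa
  | succ j ih => rw [Function.iterate_succ_apply']; exact good_step ih

-- termination measure for a good element's trajectory
def pvMu (x : Int) : Nat :=
  if pvStepB x = x then 0 else if 50 ≤ x then x.toNat + 1 else (50 - x).toNat + 1

lemma mu_lt {x : Int} (hg : pvGood x) (hne : pvStepB x ≠ x) : pvMu (pvStepB x) < pvMu x := by
  unfold pvGood at hg
  unfold pvMu
  rw [if_neg hne]
  by_cases hf : pvStepB (pvStepB x) = pvStepB x
  · rw [if_pos hf]; split_ifs <;> omega
  · rw [if_neg hf]
    rcases step_cases x with ⟨h1,h2,hv⟩|⟨h1,h2,hv⟩|⟨h1,h2,hv⟩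
    · rw [hv] at hf ⊢; split_ifs <;> omega
    · have hx1 : 1 ≤ x := by
        rcases hg with hg | hg
        · omega
        · rw [hv] at hne; omega
      rw [hv] at hf ⊢
      rcases step_cases (x * 2 + 1) with ⟨a,b,c⟩|⟨a,b,c⟩|⟨a,b,c⟩
      · omega
      · split_ifs <;> omega
      · exact absurd c hf
    · exact absurd hv hne

-- invariant of the halving phase: everything after x stays below x or odd
lemma inv_even {x : Int} (hx : 50 ≤ x) (hp : x % 2 = 0) :
    ∀ k, pvStepB^[k] (pvStepB x) < x ∨ (pvStepB^[k] (pvStepB x)) % 2 = 1 := by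
  intro k
  induction k with
  | zero =>
    simp only [Function.iterate_zero, id_eq]
    rcases step_cases x with ⟨a,b,c⟩|⟨a,b,c⟩|⟨a,b,c⟩ <;> rw [c] <;> omega
  | succ k ih =>
    rw [Function.iterate_succ_apply']
    rcases step_cases (pvStepB^[k] (pvStepB x)) with ⟨a,b,c⟩|⟨a,b,c⟩|⟨a,b,c⟩ <;> rw [c] <;> omega

-- invariant of the growth phase: everything after x stays above x and odd
lemma inv_odd {x : Int} (hx1 : 1 ≤ x) (hlt : x < 50) (hp : x % 2 = 1) :
    ∀ k, x < pvStepB^[k] (pvStepB x) ∧ (pvStepB^[k] (pvStepB x)) % 2 = 1 := by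
  intro k
  induction k with
  | zero =>
    simp only [Function.iterate_zero, id_eq]
    rcases step_cases x with ⟨a,b,c⟩|⟨a,b,c⟩|⟨a,b,c⟩ <;> rw [c] <;> omega
  | succ k ih =>
    rw [Function.iterate_succ_apply']
    rcases step_cases (pvStepB^[k] (pvStepB x)) with ⟨a,b,c⟩|⟨a,b,c⟩|⟨a,b,c⟩ <;> rw [c] <;> omega

-- a good non-fixed value is never revisited
lemma no_return {x : Int} (hg : pvGood x) (hne : pvStepB x ≠ x) :
    ∀ k, pvStepB^[k] (pvStepB x) ≠ x := by
  intro k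
  rcases step_cases x with ⟨a,b,c⟩|⟨a,b,c⟩|⟨a,b,c⟩
  · have := inv_even a b k; omega
  · have hx1 : 1 ≤ x := by
      unfold pvGood at hg
      rcases hg with h | h
      · omega
      · rw [c] at hne; omega
    have := inv_odd hx1 a b k; omega
  · exact absurd c hne

lemma fix_stable {y : Int} (h : pvStepB y = y) : ∀ m, pvStepB^[m] y = y := by
  intro m
  induction m with
  | zero => simp
  | succ m ih => rw [Function.iterate_succ_apply', ih, h]

-- Nat-valued mirror of B's counting loop (proof-side only)
def pvSn : Nat → Int → Nat
  | 0, _ => 0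
  | fuel+1, x => if pvStepB x = x then 0 else pvSn fuel (pvStepB x) + 1

lemma steps_shift : ∀ (fuel : Nat) (t x : Int), pvSteps fuel t x = t + pvSteps fuel 0 x := by
  intro fuel
  induction fuel with
  | zero => intro t x; simp [pvSteps]
  | succ fuel ih =>
    intro t x
    simp only [pvSteps]
    by_cases h : pvStepB x = x
    · simp [h]
    · simp only [h, if_false]
      rw [ih (t+1), ih (0+1)]
      ring

lemma steps_eq_sn : ∀ (fuel : Nat) (x : Int), pvSteps fuel 0 x = (pvSn fuel x : Int) := by
  intro fuel
  induction fuel with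
  | zero => intro x; simp [pvSteps, pvSn]
  | succ fuel ih =>
    intro x
    simp only [pvSteps, pvSn]
    by_cases h : pvStepB x = x
    · simp [h]
    · simp only [h, if_false]
      rw [steps_shift fuel (0+1), ih]
      push_cast; ring

-- the counting loop, run with enough fuel, returns the first index at which the trajectory is fixed
lemma sn_spec : ∀ (fuel : Nat) (x : Int), pvGood x → pvMu x ≤ fuel →
    pvSn fuel x ≤ pvMu x ∧
    pvStepB (pvStepB^[pvSn fuel x] x) = pvStepB^[pvSn fuel x] x ∧
    ∀ j < pvSn fuel x, pvStepB (pvStepB^[j] x) ≠ pvStepB^[j] x := by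
  intro fuel
  induction fuel with
  | zero =>
    intro x hg hmu
    have hfix : pvStepB x = x := by
      by_contra hne
      unfold pvMu at hmu
      rw [if_neg hne] at hmu
      split_ifs at hmu <;> omega
    refine ⟨by simp [pvSn], by simpa [pvSn], by simp [pvSn]⟩
  | succ fuel ih =>
    intro x hg hmu
    by_cases h : pvStepB x = x
    · refine ⟨by simp [pvSn, h], by simp [pvSn, h], by simp [pvSn, h]⟩
    · have hmu' : pvMu (pvStepB x) ≤ fuel := by
        have := mu_lt hg h; omega
      obtain ⟨ih1, ih2, ih3⟩ := ih (pvStepB x) (good_step hg) hmu'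
      have hsn : pvSn (fuel+1) x = pvSn fuel (pvStepB x) + 1 := by simp [pvSn, h]
      refine ⟨?_, ?_, ?_⟩
      · have := mu_lt hg h; omega
      · rw [hsn, Function.iterate_succ_apply]; exact ih2
      · intro j hj
        rw [hsn] at hj
        cases j with
        | zero => simpa using h
        | succ j =>
          rw [Function.iterate_succ_apply]
          exact ih3 j (by omega)

-- A's inner pass is the elementwise map of B's one-step transform
lemma stepA_aux : ∀ (post pre : List Int),
    (PySem.List.pyRange (pre.length : Int) ((pre.length : Int) + post.length) 1).foldl pvBodyA
      (pre ++ post) = pre ++ post.map pvStepB := by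
  intro post
  induction post with
  | nil =>
    intro pre
    rw [PySem.List.pyRange_one_eq_nil (by simp)]
    simp
  | cons x rest ih =>
    intro pre
    rw [PySem.List.pyRange_one_cons (by push_cast [List.length_cons]; omega)]
    rw [List.foldl_cons]
    have hget : PySem.List.pyGetD (pre ++ x :: rest) (pre.length : Int) 0 = x := by
      rw [PySem.List.pyGetD_natCast]
      simp [List.getD_eq_getElem?_getD]
    have hset : ∀ v : Int, PySem.List.pySetD (pre ++ x :: rest) (pre.length : Int) v
        = (pre ++ [v]) ++ rest := by
      intro v
      rw [PySem.List.pySetD_natCast]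
      rw [List.set_append_right _ _ (le_refl _)]
      simp
    have key : pvBodyA (pre ++ x :: rest) (pre.length : Int) = (pre ++ [pvStepB x]) ++ rest := by
      unfold pvBodyA pvStepB
      simp only [hget, hset]
      split_ifs <;> simp
    rw [key]
    have hend : ((pre.length : Int) + ((x :: rest).length : Int))
        = (((pre ++ [pvStepB x]).length : Int) + (rest.length : Int)) := by
      simp; ring
    have harr : ((pre.length : Int) + 1) = (((pre ++ [pvStepB x]).length : Int)) := by simp
    rw [harr, hend, ih (pre ++ [pvStepB x])]
    simp

lemma stepA_eq_map (arr : List Int) : pvStepA arr = arr.map pvStepB := by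
  have := stepA_aux arr []
  simpa [pvStepA] using this

-- the state sequence and A's history list
def pvS (arr : List Int) (j : Nat) : List Int := arr.map (pvStepB^[j])
def pvHist (arr : List Int) (i : Nat) : List (List Int) := (List.range (i+1)).map (pvS arr)
def pvFuel : Nat := 2 ^ 33
def pvN (arr : List Int) : Nat := (arr.map (pvSn pvFuel)).foldl max 0

lemma dom_mu {x : Int} (h : pvDomInt x = true) : pvMu x ≤ 2147483700 := by
  simp only [pvDomInt, decide_eq_true_eq] at h
  unfold pvMu
  split_ifs <;> omega

lemma mu_le_fuel {x : Int} (h : pvDomInt x = true) : pvMu x ≤ pvFuel := by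
  have := dom_mu h
  have hf : pvFuel = 8589934592 := by norm_num [pvFuel]
  omega

lemma dom_elem {arr : List Int} (hd : Dom_solution arr) {x : Int} (hx : x ∈ arr) : pvDomInt x = true := by
  unfold Dom_solution at hd
  rw [List.all_eq_true] at hd
  exact hd x hx

lemma pre_elem {arr : List Int} (hp : Pre_solution arr) {x : Int} (hx : x ∈ arr) : pvGood x := by
  have := hp x hx
  unfold pvGood
  rwa [PySem.Int.mod_eq_emod_of_pos (by norm_num : (0:Int) < 2)] at this

lemma sn_le_N {arr : List Int} {x : Int} (hx : x ∈ arr) : pvSn pvFuel x ≤ pvN arr :=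
  (PySem.List.le_foldl_max (arr.map (pvSn pvFuel)) 0).2 _ (List.mem_map_of_mem hx)

lemma N_attained {arr : List Int} {j : Nat} (hj : j < pvN arr) :
    ∃ x ∈ arr, j < pvSn pvFuel x := by
  rcases PySem.List.foldl_max_mem (arr.map (pvSn pvFuel)) 0 with h | h
  · unfold pvN at hj; omega
  · rcases List.mem_map.mp h with ⟨x, hx, hv⟩
    exact ⟨x, hx, by unfold pvN at hj; omega⟩

-- states before the global fixed point never repeat
lemma states_distinct {arr : List Int} (hd : Dom_solution arr) (hp : Pre_solution arr)
    {j k : Nat} (hjk : j < k) (hk : k ≤ pvN arr) : pvS arr k ≠ pvS arr j := by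
  intro heq
  obtain ⟨x, hx, hjx⟩ := N_attained (show j < pvN arr by omega)
  have hg := pre_elem hp hx
  have hmu := mu_le_fuel (dom_elem hd hx)
  obtain ⟨-, -, h3⟩ := sn_spec pvFuel x hg hmu
  have hnf : pvStepB (pvStepB^[j] x) ≠ pvStepB^[j] x := h3 j hjx
  have hco : pvStepB^[k] x = pvStepB^[j] x := List.map_inj_left.mp heq x hx
  have hk' : k = (k - j - 1) + 1 + j := by omega
  rw [hk', Function.iterate_add_apply, Function.iterate_succ_apply] at hco
  exact no_return (good_iter hg j) hnf (k - j - 1) hco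

-- at index pvN the state is a fixed point of the elementwise map
lemma sN_fixed {arr : List Int} (hd : Dom_solution arr) (hp : Pre_solution arr) :
    (pvS arr (pvN arr)).map pvStepB = pvS arr (pvN arr) := by
  unfold pvS
  rw [List.map_map]
  apply List.map_inj_left.mpr
  intro x hx
  have hg := pre_elem hp hx
  have hmu := mu_le_fuel (dom_elem hd hx)
  obtain ⟨-, h2, -⟩ := sn_spec pvFuel x hg hmu
  have hle := sn_le_N hx
  have hdec : pvN arr = (pvN arr - pvSn pvFuel x) + pvSn pvFuel x := by omega
  simp only [Function.comp_apply]
  rw [hdec, Function.iterate_add_apply, fix_stable h2, h2]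

lemma step_next {arr : List Int} (i : Nat) : (pvS arr i).map pvStepB = pvS arr (i+1) := by
  unfold pvS
  rw [List.map_map, Function.iterate_succ']

lemma hist_succ (arr : List Int) (i : Nat) :
    pvHist arr (i+1) = pvHist arr i ++ [pvS arr (i+1)] := by
  unfold pvHist
  rw [List.range_succ, List.map_append]
  simp

-- the main loop invariant for A
lemma loop_run {arr : List Int} (hd : Dom_solution arr) (hp : Pre_solution arr) :
    ∀ (fuel i : Nat), i ≤ pvN arr → pvN arr - i < fuel →
      pvLoopA fuel (pvS arr i) (pvHist arr i) = (pvN arr : Int) := by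
  intro fuel
  induction fuel with
  | zero => intro i _ h; omega
  | succ fuel ih =>
    intro i hi hfi
    simp only [pvLoopA]
    rw [stepA_eq_map, step_next]
    by_cases hcase : i = pvN arr
    · subst hcase
      have hfix : pvS arr (pvN arr + 1) = pvS arr (pvN arr) := by
        rw [← step_next, sN_fixed hd hp]
      have hmem : pvS arr (pvN arr + 1) ∈ pvHist arr (pvN arr) := by
        rw [hfix]
        exact List.mem_map_of_mem (List.mem_range.mpr (by omega))
      rw [if_pos hmem]
      unfold pvHist
      simp
    · have hlt : i < pvN arr := by omega
      have hmem : pvS arr (i+1) ∉ pvHist arr i := by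
        intro hmem
        rcases List.mem_map.mp hmem with ⟨j, hj, hv⟩
        rw [List.mem_range] at hj
        exact states_distinct hd hp (show j < i + 1 by omega) (by omega) hv.symm
      rw [if_neg hmem, ← hist_succ]
      exact ih (i+1) (by omega) (by omega)

-- B's fold of maxima equals the cast of the Nat-level maximum pvN
lemma alt_fold : ∀ (l : List Int) (n : Nat),
    l.foldl (fun best x => max best (pvSteps pvFuel 0 x)) (n : Int)
      = ((l.map (pvSn pvFuel)).foldl max n : Nat) := by
  intro l
  induction l with
  | nil => intro n; simp
  | cons x rest ih =>
    intro n
    rw [List.foldl_cons, List.map_cons, List.foldl_cons, steps_eq_sn, ← Nat.cast_max, ih]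

lemma alt_eq (arr : List Int) : solution_alt arr = (pvN arr : Int) := by
  unfold solution_alt pvN
  rw [show (2:Nat) ^ 33 = pvFuel from rfl]
  have := alt_fold arr 0
  simpa using this

lemma N_lt_fuel {arr : List Int} (hd : Dom_solution arr) (hp : Pre_solution arr) : pvN arr < pvFuel := by
  have hf : pvFuel = 8589934592 := by norm_num [pvFuel]
  rcases PySem.List.foldl_max_mem (arr.map (pvSn pvFuel)) 0 with h | h
  · unfold pvN; omega
  · rcases List.mem_map.mp h with ⟨x, hx, hv⟩
    have hmu := dom_mu (dom_elem hd hx)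
    have h1 : pvSn pvFuel x ≤ pvMu x :=
      (sn_spec pvFuel x (pre_elem hp hx) (mu_le_fuel (dom_elem hd hx))).1
    unfold pvN
    omega

-- ===== VERDICT (by name: the statement is the Claim_ definition above) =====
theorem solution_spec : Claim_equal_solution := by
  intro arr hd hp
  unfold Spec_solution
  rw [alt_eq]
  unfold solution
  have h0 : pvS arr 0 = arr := by unfold pvS; simp
  have hh : pvHist arr 0 = [arr] := by unfold pvHist; simp [h0]
  rw [show (2:Nat) ^ 33 = pvFuel from rfl]
  have hrun := loop_run hd hp pvFuel 0 (Nat.zero_le _) (by have := N_lt_fuel hd hp; omega)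
  rw [h0, hh] at hrun
  exact hrun
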